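-- pv_equiv track=rewrite | github.com/meer1992/Orion | code/iwlnl_struct.py | break_bits
-- ===== SOURCE A (Python) =====
-- def break_bits(bitpatterns):
--     l = len(bitpatterns)
--     result = [None] * l
--     # for every sub-carrier
--     for sc in range(l):
--         (bits, bitstring) = bitpatterns[sc];
--         ks = []
--         ## reverse the number of bits, since the last bitstring concatinated is the first one now
--         bits.reverse()
--         for b in bits:
--             bitmask = 2 ** b - 1
--             n = bitstring & bitmask
--             ks.append(n)
--             bitstring = bitstring >> b
--         result[sc] = (bits, ks)
--
--     return result
-- ===== SOURCE B (Python) =====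
-- def break_bits(bitpatterns):
--     # Same return value as A; also mutates each bits list in place (bits.reverse()), like A.
--     result = []
--     for (bits, bitstring) in bitpatterns:
--         bits.reverse()
--         offsets = [0]
--         for b in bits:
--             offsets.append(offsets[-1] + b)
--         ks = [(bitstring >> off) & (2 ** b - 1) for off, b in zip(offsets, bits)]
--         result.append((bits, ks))
--     return result
-- ===== Notes on version B (the rewrite author's own statement) =====
-- stated objective: alternative
-- what changed: B first builds a table of cumulative bit offsets over the reversed widths and then extracts every field directly as (bitstring >> offset) & mask in one indexed pass, instead of A's sequential destructive shifting of bitstring inside the loop.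
import Mathlib
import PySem

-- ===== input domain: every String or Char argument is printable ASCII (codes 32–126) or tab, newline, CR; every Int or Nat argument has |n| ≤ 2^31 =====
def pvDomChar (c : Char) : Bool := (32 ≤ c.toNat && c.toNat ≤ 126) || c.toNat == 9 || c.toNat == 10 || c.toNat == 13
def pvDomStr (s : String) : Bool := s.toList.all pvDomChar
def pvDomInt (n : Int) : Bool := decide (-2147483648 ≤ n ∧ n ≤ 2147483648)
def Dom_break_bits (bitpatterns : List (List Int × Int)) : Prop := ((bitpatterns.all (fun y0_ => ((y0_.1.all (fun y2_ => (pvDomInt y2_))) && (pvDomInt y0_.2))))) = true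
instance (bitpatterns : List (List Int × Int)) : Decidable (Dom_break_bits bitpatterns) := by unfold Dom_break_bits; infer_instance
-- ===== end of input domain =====

-- B changes the decomposition: a cumulative-offset table plus direct masked extraction replaces
-- A's destructive shifting of bitstring inside the loop ('alternative'; same cost).
-- Both Pythons also reverse each bits list in place; equivalence here is about the return value.

-- ===== PORT A =====
-- A's inner loop: for b in bits: ks.append(bitstring & (2**b-1)); bitstring >>= b
-- (bitstring & (2**b - 1) is PySem.Int.band; bitstring >> b is Lean's >>>; b ≥ 0 by Pre_)
def aLoop (bits : List Int) (ks : List Int) (bitstring : Int) : List Int :=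
  match bits with
  | [] => ks
  | b :: rest =>
      let bitmask : Int := 2 ^ b.toNat - 1
      let n : Int := PySem.Int.band bitstring bitmask
      aLoop rest (ks ++ [n]) (bitstring >>> b.toNat)

def break_bits (bitpatterns : List (List Int × Int)) : List (List Int × List Int) :=
  bitpatterns.map (fun p =>
    let bits := p.1.reverse
    (bits, aLoop bits [] p.2))

-- ===== PORT B =====
-- B's offset loop: offsets = [0]; for b in bits: offsets.append(offsets[-1] + b)
-- (offsets[-1] = getLastD; the list is never empty, it starts as [0])
def bOffLoop (bits : List Int) (offs : List Int) : List Int :=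
  match bits with
  | [] => offs
  | b :: rest => bOffLoop rest (offs ++ [offs.getLastD 0 + b])

def break_bits_alt (bitpatterns : List (List Int × Int)) : List (List Int × List Int) :=
  bitpatterns.map (fun p =>
    let bits := p.1.reverse
    let offsets := bOffLoop bits [0]
    let ks := (offsets.zip bits).map (fun q =>
      PySem.Int.band (p.2 >>> q.1.toNat) (2 ^ q.2.toNat - 1))
    (bits, ks))

-- ===== PRECONDITION & SPEC =====
-- Pre_ excludes exactly the inputs on which Python A raises: a negative bit width b makes
-- 2**b a float (TypeError on &) and bitstring >> b a ValueError.
def Pre_break_bits (bitpatterns : List (List Int × Int)) : Prop :=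
  ∀ p ∈ bitpatterns, ∀ b ∈ p.1, 0 ≤ b
instance (bitpatterns : List (List Int × Int)) : Decidable (Pre_break_bits bitpatterns) := by
  unfold Pre_break_bits; infer_instance

def pvWitness_break_bits : (List (List Int × Int)) := [([2, 3], 21), ([], 5), ([1, 1, 4], -9)]

def Spec_break_bits (bitpatterns : List (List Int × Int)) (out : List (List Int × List Int)) : Prop := out = break_bits_alt bitpatterns
instance (bitpatterns : List (List Int × Int)) (out : List (List Int × List Int)) : Decidable (Spec_break_bits bitpatterns out) := by unfold Spec_break_bits; infer_instance

-- ===== CLAIM (what is proved, stated in full; the proofs are below) =====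
def Claim_equal_break_bits : Prop := ∀ (bitpatterns : List (List Int × Int)), Dom_break_bits bitpatterns → Pre_break_bits bitpatterns → Spec_break_bits bitpatterns (break_bits bitpatterns)

-- ===== LEMMAS AND PROOFS =====

-- A's loop accumulates by appending.
theorem aLoop_append (bits : List Int) (ks ks' : List Int) (s : Int) :
    aLoop bits (ks ++ ks') s = ks ++ aLoop bits ks' s := by
  induction bits generalizing ks' s with
  | nil => simp [aLoop]
  | cons b rest ih =>
      simp only [aLoop]
      rw [List.append_assoc, ih]

-- B's offset loop only extends the list: a prefix passes through.
theorem bOffLoop_prefix (bits : List Int) (offs : List Int) (c : Int) :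
    bOffLoop bits (offs ++ [c]) = offs ++ bOffLoop bits [c] := by
  induction bits generalizing offs c with
  | nil => simp [bOffLoop]
  | cons b rest ih =>
      have h1 : ([c] : List Int).getLastD 0 = c := rfl
      simp only [bOffLoop, List.getLastD_concat, h1]
      rw [ih (offs ++ [c]) (c + b), ih [c] (c + b), List.append_assoc]

theorem bOffLoop_cons (b : Int) (rest : List Int) (c : Int) :
    bOffLoop (b :: rest) [c] = c :: bOffLoop rest [c + b] := by
  have h := bOffLoop_prefix rest [c] (c + b)
  have h1 : ([c] : List Int).getLastD 0 = c := rfl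
  simp only [bOffLoop, h1] at *
  simpa using h

-- shifting twice is shifting by the sum
theorem shift_shift (s : Int) (a b : Nat) : (s >>> a) >>> b = s >>> (a + b) := by
  simp only [Int.shiftRight_eq_div_pow]
  rw [Int.ediv_ediv_of_nonneg (by positivity), ← Nat.cast_mul, ← pow_add]

-- core row equivalence: extraction at cumulative offsets = sequential shifting
theorem row_eq (bits : List Int) (hb : ∀ b ∈ bits, 0 ≤ b) (s : Int) (c : Int) (hc : 0 ≤ c) :
    ((bOffLoop bits [c]).zip bits).map (fun q =>
        PySem.Int.band (s >>> q.1.toNat) (2 ^ q.2.toNat - 1))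
      = aLoop bits [] (s >>> c.toNat) := by
  induction bits generalizing c with
  | nil => simp [bOffLoop, aLoop]
  | cons b rest ih =>
      have hb0 : 0 ≤ b := hb b (by simp)
      have hrest : ∀ x ∈ rest, 0 ≤ x := fun x hx => hb x (by simp [hx])
      rw [bOffLoop_cons]
      simp only [List.zip_cons_cons, List.map_cons]
      rw [ih hrest (c + b) (by omega)]
      have hsum : (c + b).toNat = c.toNat + b.toNat := by omega
      rw [hsum, ← shift_shift, Int.shiftRight_natCast_right]
      have : aLoop (b :: rest) [] (s >>> c.toNat)
          = PySem.Int.band (s >>> c.toNat) (2 ^ b.toNat - 1)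
            :: aLoop rest [] ((s >>> c.toNat) >>> b.toNat) := by
        simp only [aLoop]
        rw [show PySem.Int.band (s >>> c.toNat) (2 ^ b.toNat - 1)
              :: aLoop rest [] ((s >>> c.toNat) >>> b.toNat)
            = [PySem.Int.band (s >>> c.toNat) (2 ^ b.toNat - 1)]
              ++ aLoop rest [] ((s >>> c.toNat) >>> b.toNat) from rfl]
        rw [← aLoop_append]
        rfl
      rw [this]

-- ===== VERDICT (by name: the statement is the Claim_ definition above) =====
theorem break_bits_spec : Claim_equal_break_bits := by
  intro bp _ hpre
  unfold Spec_break_bits break_bits break_bits_alt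
  apply List.map_congr_left
  intro p hp
  have hb : ∀ b ∈ p.1.reverse, 0 ≤ b := by
    intro b hbmem
    exact hpre p hp b (List.mem_reverse.mp hbmem)
  have := row_eq p.1.reverse hb p.2 0 le_rfl
  simp only [Int.toNat_zero, Int.shiftRight_zero] at this
  simp only [← this, Int.shiftRight_natCast_right]
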